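-- pv_equiv track=rewrite | github.com/DataRecce/recce | recce/util/lineage.py | find_downstream
-- ===== SOURCE A (Python) =====
-- def find_downstream(node, child_map):
--     visited = set()
--     downstream = set()
--
--     def dfs(current):
--         if current in visited:
--             return
--         visited.add(current)
--
--         children = child_map.get(current, [])
--         for child in children:
--             downstream.add(child)
--             dfs(child)
--
--     dfs(node)
--     return downstream
-- ===== SOURCE B (Python) =====
-- def find_downstream(node, child_map):
--     visited = {node}
--     downstream = set()
--     stack = [list(child_map.get(node, []))]
--     while stack:
--         top = stack[-1]
--         if not top:
--             stack.pop()
--             continue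
--         child = top.pop(0)
--         downstream.add(child)
--         if child not in visited:
--             visited.add(child)
--             stack.append(list(child_map.get(child, [])))
--     return downstream
-- ===== Notes on version B (the rewrite author's own statement) =====
-- stated objective: alternative
-- what changed: A's recursive DFS with a nested closure is replaced by an iterative loop over an explicit stack of pending child lists; visited/downstream sets are kept the same way, so the result set is identical.
import Mathlib
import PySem

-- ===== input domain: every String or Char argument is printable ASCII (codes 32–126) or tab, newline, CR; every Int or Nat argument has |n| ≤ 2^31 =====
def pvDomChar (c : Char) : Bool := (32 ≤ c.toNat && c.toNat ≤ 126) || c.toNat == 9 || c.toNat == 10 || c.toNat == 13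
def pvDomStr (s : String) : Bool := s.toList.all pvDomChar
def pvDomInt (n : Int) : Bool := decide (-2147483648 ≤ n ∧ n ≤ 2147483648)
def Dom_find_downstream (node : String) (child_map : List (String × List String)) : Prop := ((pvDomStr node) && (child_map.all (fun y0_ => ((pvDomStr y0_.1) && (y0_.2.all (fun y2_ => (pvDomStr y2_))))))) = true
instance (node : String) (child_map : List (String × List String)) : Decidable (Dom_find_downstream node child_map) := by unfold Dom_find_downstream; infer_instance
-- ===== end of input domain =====

-- B replaces A's recursive DFS (nested closure) by an iterative loop over an explicit stack
-- of pending child lists; same visited/downstream sets, so the returned set is the same.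

-- ===== PORT A =====
-- A's recursive `dfs`: the fuel is a totality guard only (it counts nesting depth; each
-- nested call starts at an unvisited node, so |all children| + 2 provably suffices — the
-- equivalence theorem below depends on that sufficiency, proved in the lemmas).
def pvDfsA (cm : List (String × List String)) :
    Nat → String → PySem.Set String × PySem.Set String → PySem.Set String × PySem.Set String
  | 0, _, vd => vd
  | n+1, current, vd =>
    if PySem.Set.contains vd.1 current then vd
    else
      ((PySem.Dict.mk cm).getD current []).foldl
        (fun vd2 child => pvDfsA cm n child (vd2.1, PySem.Set.add vd2.2 child))
        (PySem.Set.add vd.1 current, vd.2)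

def find_downstream (node : String) (child_map : List (String × List String)) : List String :=
  (pvDfsA child_map ((child_map.flatMap (fun p => p.2)).length + 2) node
    (PySem.Set.empty, PySem.Set.empty)).2

-- ===== PORT B =====
-- all values that can ever be pushed on the stack (used only for termination)
def pvAllCh (cm : List (String × List String)) : List String := cm.flatMap (fun p => p.2)

-- any children list taken from the map is inside pvAllCh (cited by pvRun's termination proof)
theorem pvChildren_sub (cm : List (String × List String)) (c : String) :
    ∀ x ∈ (PySem.Dict.mk cm).getD c [], x ∈ pvAllCh cm := by
  induction cm with
  | nil => intro x hx; simp [PySem.Dict.getD, PySem.Dict.get?] at hx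
  | cons p rest ih =>
    obtain ⟨k, vs⟩ := p
    intro x hx
    rw [PySem.Dict.getD_eq_get?_getD, PySem.Dict.get?_mk_cons] at hx
    simp only [pvAllCh, List.flatMap_cons, List.mem_append]
    by_cases hpc : (k == c) = true
    · rw [if_pos hpc] at hx
      exact Or.inl (by simpa using hx)
    · rw [if_neg hpc] at hx
      rw [← PySem.Dict.getD_eq_get?_getD] at hx
      exact Or.inr (by simpa [pvAllCh] using ih x hx)

-- termination measures for pvRun's loop
def pvUnvis (cm : List (String × List String)) (v : PySem.Set String) : Nat :=
  ((pvAllCh cm).filter (fun x => !(PySem.Set.contains v x))).length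

def pvBad (cm : List (String × List String)) (stack : List (List String)) : Nat :=
  stack.foldr (fun l a => (l.filter (fun x => !(decide (x ∈ pvAllCh cm)))).length + a) 0

def pvSSize (stack : List (List String)) : Nat :=
  stack.foldr (fun l acc => l.length + 1 + acc) 0

theorem pvUnvis_lt (cm : List (String × List String)) (v : PySem.Set String) (c : String)
    (hc : c ∈ pvAllCh cm) (hv : c ∉ v) : pvUnvis cm (PySem.Set.add v c) < pvUnvis cm v := by
  have hsub : ((pvAllCh cm).filter (fun x => !(PySem.Set.contains (PySem.Set.add v c) x))).Sublist
      ((pvAllCh cm).filter (fun x => !(PySem.Set.contains v x))) := by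
    apply List.monotone_filter_right
    intro a ha
    simp only [Bool.not_eq_true', ← Bool.not_eq_true, PySem.Set.contains_iff] at ha ⊢
    exact fun hmem => ha ((PySem.Set.mem_add _ _ _).2 (Or.inl hmem))
  rcases Nat.lt_or_ge ((pvAllCh cm).filter (fun x => !(PySem.Set.contains (PySem.Set.add v c) x))).length
      ((pvAllCh cm).filter (fun x => !(PySem.Set.contains v x))).length with h | h
  · exact h
  · exfalso
    have heq := hsub.eq_of_length (Nat.le_antisymm hsub.length_le h)
    have hcmem : c ∈ (pvAllCh cm).filter (fun x => !(PySem.Set.contains v x)) := by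
      simp [List.mem_filter, hc, hv]
    rw [← heq] at hcmem
    have := (List.mem_filter.1 hcmem).2
    simp [PySem.Set.mem_add] at this

theorem pvUnvis_add_eq (cm : List (String × List String)) (v : PySem.Set String) (c : String)
    (hc : c ∉ pvAllCh cm) : pvUnvis cm (PySem.Set.add v c) = pvUnvis cm v := by
  unfold pvUnvis
  congr 1
  apply List.filter_congr
  intro x hx
  have hxc : x ≠ c := fun he => hc (he ▸ hx)
  have hb : PySem.Set.contains (PySem.Set.add v c) x = PySem.Set.contains v x := by
    by_cases hm : x ∈ v
    · rw [(PySem.Set.contains_iff _ _).2 ((PySem.Set.mem_add _ _ _).2 (Or.inl hm)),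
          (PySem.Set.contains_iff _ _).2 hm]
    · have h1 : x ∉ PySem.Set.add v c := fun hmm => by
        rcases (PySem.Set.mem_add _ _ _).1 hmm with h | h
        · exact hm h
        · exact hxc h
      rw [Bool.eq_false_iff.2 (fun ht => h1 ((PySem.Set.contains_iff _ _).1 ht)),
          Bool.eq_false_iff.2 (fun ht => hm ((PySem.Set.contains_iff _ _).1 ht))]
  rw [hb]

theorem pvBad_children_zero (cm : List (String × List String)) (c : String) :
    ((PySem.Dict.mk cm).getD c []).filter (fun x => !(decide (x ∈ pvAllCh cm))) = [] := by
  rw [List.filter_eq_nil_iff]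
  intro x hx
  simp [pvChildren_sub cm c x hx]

-- B's while loop: pop the head child of the top list (empty top lists are dropped),
-- add it to downstream, push its children if unvisited.
def pvRun (cm : List (String × List String)) (stack : List (List String))
    (v d : PySem.Set String) : PySem.Set String :=
  match stack with
  | [] => d
  | [] :: rest => pvRun cm rest v d
  | (c :: cs) :: rest =>
    if PySem.Set.contains v c then
      pvRun cm (cs :: rest) v (PySem.Set.add d c)
    else
      pvRun cm ((PySem.Dict.mk cm).getD c [] :: cs :: rest)
        (PySem.Set.add v c) (PySem.Set.add d c)
termination_by ((pvUnvis cm v, pvBad cm stack), pvSSize stack)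
decreasing_by
  · have hbeq : pvBad cm rest = pvBad cm ([] :: rest) := by simp [pvBad]
    rw [hbeq]
    apply Prod.Lex.right
    simp [pvSSize]
  · by_cases hb : c ∈ pvAllCh cm
    · have hbeq : pvBad cm (cs :: rest) = pvBad cm ((c :: cs) :: rest) := by
        simp [pvBad, hb]
      rw [hbeq]
      apply Prod.Lex.right
      simp [pvSSize]
    · apply Prod.Lex.left
      apply Prod.Lex.right
      simp only [pvBad, List.foldr_cons, List.filter_cons]
      rw [if_pos (by simpa using hb)]
      simp only [List.length_cons]
      omega
  · rename_i hv
    by_cases hb : c ∈ pvAllCh cm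
    · apply Prod.Lex.left
      apply Prod.Lex.left
      exact pvUnvis_lt cm v c hb (fun hm => hv ((PySem.Set.contains_iff _ _).2 hm))
    · rw [pvUnvis_add_eq cm v c hb]
      apply Prod.Lex.left
      apply Prod.Lex.right
      simp only [pvBad, List.foldr_cons, pvBad_children_zero cm c, List.length_nil,
        List.filter_cons]
      rw [if_pos (by simpa using hb)]
      simp only [List.length_cons]
      omega

def find_downstream_alt (node : String) (child_map : List (String × List String)) : List String :=
  pvRun child_map [(PySem.Dict.mk child_map).getD node []]
    (PySem.Set.ofList [node]) PySem.Set.empty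

-- ===== PRECONDITION & SPEC =====
def Spec_find_downstream (node : String) (child_map : List (String × List String)) (out : List String) : Prop := out = find_downstream_alt node child_map
instance (node : String) (child_map : List (String × List String)) (out : List String) : Decidable (Spec_find_downstream node child_map out) := by unfold Spec_find_downstream; infer_instance

-- ===== CLAIM (what is proved, stated in full; the proofs are below) =====
def Claim_equal_find_downstream : Prop := ∀ (node : String) (child_map : List (String × List String)), Dom_find_downstream node child_map → Spec_find_downstream node child_map (find_downstream node child_map)

-- ===== LEMMAS AND PROOFS =====

theorem pvUnvis_mono (cm : List (String × List String)) (v w : PySem.Set String)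
    (h : ∀ x, x ∈ v → x ∈ w) : pvUnvis cm w ≤ pvUnvis cm v := by
  apply List.Sublist.length_le
  apply List.monotone_filter_right
  intro a ha
  simp only [Bool.not_eq_true', ← Bool.not_eq_true, PySem.Set.contains_iff] at ha ⊢
  exact fun hv => ha (h a hv)


-- A's inner for-loop as a fold step, to name it in the lemmas
def pvStep (cm : List (String × List String)) (n : Nat) :
    PySem.Set String × PySem.Set String → String → PySem.Set String × PySem.Set String :=
  fun vd2 child => pvDfsA cm n child (vd2.1, PySem.Set.add vd2.2 child)

theorem pvDfsA_succ (cm : List (String × List String)) (n : Nat) (c : String)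
    (v d : PySem.Set String) (hc : c ∉ v) :
    pvDfsA cm (n+1) c (v, d) =
      ((PySem.Dict.mk cm).getD c []).foldl (pvStep cm n) (PySem.Set.add v c, d) := by
  rw [pvDfsA, if_neg]
  · rfl
  · simpa [PySem.Set.contains_iff] using hc

theorem pvDfsA_visited_mono (cm : List (String × List String)) :
    ∀ (n : Nat) (c : String) (p : PySem.Set String × PySem.Set String) (x : String),
      x ∈ p.1 → x ∈ (pvDfsA cm n c p).1 := by
  intro n
  induction n with
  | zero => intro c p x hx; simpa [pvDfsA] using hx
  | succ n ih =>
    intro c p x hx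
    obtain ⟨v, d⟩ := p
    rw [pvDfsA]
    split
    · exact hx
    · have hfold : ∀ (l : List String) (q : PySem.Set String × PySem.Set String),
          x ∈ q.1 → x ∈ (l.foldl (pvStep cm n) q).1 := by
        intro l
        induction l with
        | nil => intro q hq; simpa using hq
        | cons a as ihl =>
          intro q hq
          simpa [pvStep] using ihl _ (ih a (q.1, PySem.Set.add q.2 a) x hq)
      exact hfold _ (PySem.Set.add v c, d) ((PySem.Set.mem_add _ _ _).2 (Or.inl hx))

-- the simulation: pvRun consumes the top list exactly as A's for-loop / dfs does
theorem pvSim (cm : List (String × List String)) :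
    ∀ n : Nat,
      (∀ (c : String) (cs : List String) (rest : List (List String))
          (v d : PySem.Set String), c ∈ pvAllCh cm →
          n ≥ pvUnvis cm v + 1 →
          pvRun cm ((c :: cs) :: rest) v d =
            pvRun cm (cs :: rest) (pvDfsA cm n c (v, PySem.Set.add d c)).1
              (pvDfsA cm n c (v, PySem.Set.add d c)).2) ∧
      (∀ (l : List String) (rest : List (List String))
          (v d : PySem.Set String), (∀ x ∈ l, x ∈ pvAllCh cm) →
          n ≥ pvUnvis cm v + 1 →
          pvRun cm (l :: rest) v d =
            pvRun cm rest (l.foldl (pvStep cm n) (v, d)).1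
              (l.foldl (pvStep cm n) (v, d)).2) := by
  intro n
  induction n with
  | zero =>
    constructor
    · intro _ _ _ _ _ _ hn; omega
    · intro _ _ _ _ _ hn; omega
  | succ n ih =>
    have phi : ∀ (c : String) (cs : List String) (rest : List (List String))
        (v d : PySem.Set String), c ∈ pvAllCh cm →
        n + 1 ≥ pvUnvis cm v + 1 →
        pvRun cm ((c :: cs) :: rest) v d =
          pvRun cm (cs :: rest) (pvDfsA cm (n+1) c (v, PySem.Set.add d c)).1
            (pvDfsA cm (n+1) c (v, PySem.Set.add d c)).2 := by
      intro c cs rest v d hcA hn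
      rw [pvRun]
      by_cases hv : PySem.Set.contains v c
      · rw [if_pos hv]
        have : pvDfsA cm (n+1) c (v, PySem.Set.add d c) = (v, PySem.Set.add d c) := by
          rw [pvDfsA, if_pos hv]
        rw [this]
      · rw [if_neg hv]
        have hcv : c ∉ v := fun hm => hv ((PySem.Set.contains_iff _ _).2 hm)
        have hlt := pvUnvis_lt cm v c hcA hcv
        rw [pvDfsA_succ cm n c v (PySem.Set.add d c) hcv]
        exact ih.2 ((PySem.Dict.mk cm).getD c []) (cs :: rest)
          (PySem.Set.add v c) (PySem.Set.add d c) (pvChildren_sub cm c) (by omega)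
    refine ⟨phi, ?_⟩
    intro l
    induction l with
    | nil =>
      intro rest v d _ _
      rw [pvRun]
      rfl
    | cons c cs ihl =>
      intro rest v d hl hn
      rw [phi c cs rest v d (hl c (List.mem_cons_self ..)) hn]
      have hmono := pvDfsA_visited_mono cm (n+1) c (v, PySem.Set.add d c)
      have hle : pvUnvis cm (pvDfsA cm (n+1) c (v, PySem.Set.add d c)).1 ≤ pvUnvis cm v :=
        pvUnvis_mono cm v _ hmono
      rw [ihl rest _ _ (fun x hx => hl x (List.mem_cons_of_mem _ hx)) (by omega)]
      rfl

theorem find_downstream_eq (node : String) (cm : List (String × List String)) :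
    find_downstream node cm = find_downstream_alt node cm := by
  unfold find_downstream find_downstream_alt
  have hnode : (node : String) ∉ (PySem.Set.empty : PySem.Set String) := by simp [PySem.Set.empty]
  have hstart : PySem.Set.ofList [node] = PySem.Set.add PySem.Set.empty node := rfl
  have hA := pvDfsA_succ cm ((cm.flatMap (fun p => p.2)).length + 1) node
    PySem.Set.empty PySem.Set.empty hnode
  have hfuel : (cm.flatMap (fun p => p.2)).length + 1 ≥
      pvUnvis cm (PySem.Set.add PySem.Set.empty node) + 1 := by
    have : pvUnvis cm (PySem.Set.add PySem.Set.empty node) ≤ (pvAllCh cm).length :=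
      List.length_filter_le _ _
    simpa [pvAllCh] using Nat.add_le_add_right this 1
  have hB := (pvSim cm ((cm.flatMap (fun p => p.2)).length + 1)).2
    ((PySem.Dict.mk cm).getD node []) []
    (PySem.Set.add PySem.Set.empty node) PySem.Set.empty
    (pvChildren_sub cm node) hfuel
  rw [hstart, hB, pvRun]
  rw [show (cm.flatMap (fun p => p.2)).length + 2 =
    ((cm.flatMap (fun p => p.2)).length + 1) + 1 from rfl, hA]

-- ===== VERDICT (by name: the statement is the Claim_ definition above) =====
theorem find_downstream_spec : Claim_equal_find_downstream := by
  intro node child_map _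
  unfold Spec_find_downstream
  exact find_downstream_eq node child_map
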